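-- pv_equiv track=rewrite | github.com/stevenchri5/PowerFactory-GUI | otaki_sim.py | _resolve_bus_name
-- ===== SOURCE A (Python) =====
-- def _resolve_bus_name(config_bus: str, bus_dict: dict):
--     """
--     Return the actual terminal name from bus_dict that best matches config_bus.
--     Priority: exact match -> common LV suffix -> startswith -> contains -> None.
--     """
--     # 1) Exact match
--     if config_bus in bus_dict:
--         return config_bus
--
--     # 2) Common LV suffix used in many models (e.g., "OTKa" -> "OTKa_0.415")
--     cand = f"{config_bus}_0.415"
--     if cand in bus_dict:
--         return cand
--
--     # 3) Name starts with configured token (e.g., "OTKa" matches "OTKa LV Bus")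
--     for name in bus_dict:
--         if name.startswith(config_bus):
--             return name
--
--     # 4) Fuzzy contains as last resort
--     for name in bus_dict:
--         if config_bus in name:
--             return name
--
--     # 5) No match
--     return None
-- ===== SOURCE B (Python) =====
-- def _rank(config_bus, cand, name):
--     if name == config_bus:
--         return 0
--     if name == cand:
--         return 1
--     if name.startswith(config_bus):
--         return 2
--     if config_bus in name:
--         return 3
--     return 4
--
--
-- def _resolve_bus_name(config_bus: str, bus_dict: dict):
--     """Single pass: score every key with a match rank (exact=0, LV suffix=1,
--     startswith=2, contains=3) and keep the first key of minimal rank."""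
--     cand = f"{config_bus}_0.415"
--     best = None
--     for name in bus_dict:
--         r = _rank(config_bus, cand, name)
--         if r < 4 and (best is None or r < best[0]):
--             best = (r, name)
--     return best[1] if best is not None else None
-- ===== Notes on version B (the rewrite author's own statement) =====
-- stated objective: alternative
-- what changed: Replaced A's staged lookups and two separate scans by a single pass that ranks every key (exact=0, suffix=1, startswith=2, contains=3) and keeps the first key of minimal rank.
import Mathlib
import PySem

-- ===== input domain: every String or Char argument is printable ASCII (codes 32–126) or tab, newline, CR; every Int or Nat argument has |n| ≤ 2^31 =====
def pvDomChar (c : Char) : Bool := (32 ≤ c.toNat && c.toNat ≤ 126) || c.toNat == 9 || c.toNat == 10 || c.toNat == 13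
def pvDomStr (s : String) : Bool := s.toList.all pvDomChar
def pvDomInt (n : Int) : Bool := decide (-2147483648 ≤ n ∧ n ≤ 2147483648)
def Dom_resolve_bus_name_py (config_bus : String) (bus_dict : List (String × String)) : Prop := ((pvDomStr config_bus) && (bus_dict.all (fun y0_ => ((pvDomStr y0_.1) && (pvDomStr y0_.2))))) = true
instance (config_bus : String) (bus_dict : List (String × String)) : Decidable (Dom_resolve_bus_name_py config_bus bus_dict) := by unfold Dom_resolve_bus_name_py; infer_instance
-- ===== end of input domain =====

-- B replaces A's staged lookups/scans by one pass keeping the first key of minimal match rank (objective: alternative).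

-- ===== PORT A =====
def pyGoStarts (config_bus : String) : List (String × String) → Option String
  | [] => none
  | (name, _) :: rest =>
      if PySem.Str.startswith name config_bus then some name
      else pyGoStarts config_bus rest

def pyGoContains (config_bus : String) : List (String × String) → Option String
  | [] => none
  | (name, _) :: rest =>
      if PySem.Str.isIn config_bus name then some name
      else pyGoContains config_bus rest

def resolve_bus_name_py (config_bus : String) (bus_dict : List (String × String)) : Option String :=
  -- 1) exact match
  if bus_dict.any (fun kv => kv.1 == config_bus) then some config_bus
  else
    -- 2) common LV suffix
    let cand := config_bus ++ "_0.415"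
    if bus_dict.any (fun kv => kv.1 == cand) then some cand
    else
      -- 3) startswith scan, then 4) contains scan, else 5) none
      match pyGoStarts config_bus bus_dict with
      | some name => some name
      | none => pyGoContains config_bus bus_dict

-- ===== PORT B =====
def pyRank (config_bus cand name : String) : Nat :=
  if name == config_bus then 0
  else if name == cand then 1
  else if PySem.Str.startswith name config_bus then 2
  else if PySem.Str.isIn config_bus name then 3
  else 4

def pyBestLoop (config_bus cand : String) (best : Option (Nat × String)) :
    List (String × String) → Option (Nat × String)
  | [] => best
  | (name, _) :: rest =>
      let r := pyRank config_bus cand name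
      -- 'if r < 4 and (best is None or r < best[0]): best = (r, name)'
      let best' :=
        match best with
        | none => if r < 4 then some (r, name) else none
        | some (br, bn) => if r < 4 ∧ r < br then some (r, name) else some (br, bn)
      pyBestLoop config_bus cand best' rest

def resolve_bus_name_py_alt (config_bus : String) (bus_dict : List (String × String)) : Option String :=
  let cand := config_bus ++ "_0.415"
  match pyBestLoop config_bus cand none bus_dict with
  | some (_, name) => some name
  | none => none

-- ===== PRECONDITION & SPEC =====
def Spec_resolve_bus_name_py (config_bus : String) (bus_dict : List (String × String)) (out : Option String) : Prop := out = resolve_bus_name_py_alt config_bus bus_dict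
instance (config_bus : String) (bus_dict : List (String × String)) (out : Option String) : Decidable (Spec_resolve_bus_name_py config_bus bus_dict out) := by unfold Spec_resolve_bus_name_py; infer_instance

-- ===== CLAIM (what is proved, stated in full; the proofs are below) =====
def Claim_equal_resolve_bus_name_py : Prop := ∀ (config_bus : String) (bus_dict : List (String × String)), Dom_resolve_bus_name_py config_bus bus_dict → Spec_resolve_bus_name_py config_bus bus_dict (resolve_bus_name_py config_bus bus_dict)

-- ===== LEMMAS AND PROOFS =====

/-- Proof-side structural characterisation of B's loop result. -/
def bestSpec (c cand : String) : List (String × String) → Option (Nat × String)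
  | [] => none
  | (name, _) :: rest =>
      let r := pyRank c cand name
      match bestSpec c cand rest with
      | none => if r < 4 then some (r, name) else none
      | some (br, bn) => if r < 4 ∧ r ≤ br then some (r, name) else some (br, bn)

theorem pyBestLoop_acc (c cand : String) (l : List (String × String)) :
    ∀ br bn, pyBestLoop c cand (some (br, bn)) l =
      match bestSpec c cand l with
      | some (r, n) => if r < br then some (r, n) else some (br, bn)
      | none => some (br, bn) := by
  induction l with
  | nil => intro br bn; simp [pyBestLoop, bestSpec]
  | cons kv rest ih =>
      intro br bn
      obtain ⟨name, v⟩ := kv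
      simp only [pyBestLoop, bestSpec]
      by_cases h : pyRank c cand name < 4 ∧ pyRank c cand name < br
      · rw [if_pos h, ih]
        cases hb : bestSpec c cand rest with
        | none => simp [h.1, h.2]
        | some p =>
            obtain ⟨r', n'⟩ := p
            by_cases hrr : pyRank c cand name ≤ r'
            · have h1 : ¬ r' < pyRank c cand name := by omega
              simp [h.1, h.2, hrr, h1]
            · have h1 : r' < pyRank c cand name := by omega
              have h2 : r' < br := by omega
              have h3 : ¬ (pyRank c cand name < 4 ∧ pyRank c cand name ≤ r') := by omega
              simp [h1, h2, h3]
      · rw [if_neg h, ih]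
        cases hb : bestSpec c cand rest with
        | none =>
            by_cases h4 : pyRank c cand name < 4
            · have h5 : ¬ pyRank c cand name < br := by omega
              simp [h4, h5]
            · simp [h4]
        | some p =>
            obtain ⟨r', n'⟩ := p
            by_cases hA : pyRank c cand name < 4 ∧ pyRank c cand name ≤ r'
            · have h5 : ¬ pyRank c cand name < br := by omega
              have h6 : ¬ r' < br := by omega
              simp [hA, h5, h6]
            · simp [hA]

theorem pyBestLoop_none (c cand : String) (l : List (String × String)) :
    pyBestLoop c cand none l = bestSpec c cand l := by
  cases l with
  | nil => simp [pyBestLoop, bestSpec]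
  | cons kv rest =>
      obtain ⟨name, v⟩ := kv
      simp only [pyBestLoop, bestSpec]
      by_cases h4 : pyRank c cand name < 4
      · rw [if_pos h4, pyBestLoop_acc]
        cases hb : bestSpec c cand rest with
        | none => simp
        | some p =>
            obtain ⟨r', n'⟩ := p
            by_cases hrr : pyRank c cand name ≤ r'
            · have h1 : ¬ r' < pyRank c cand name := by omega
              simp [h4, hrr, h1]
            · have h1 : r' < pyRank c cand name := by omega
              have h3 : ¬ (pyRank c cand name < 4 ∧ pyRank c cand name ≤ r') := by omega
              simp [h1, h3]
      · rw [if_neg h4, pyBestLoop_none]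
        cases hb : bestSpec c cand rest with
        | none => simp
        | some p =>
            obtain ⟨r', n'⟩ := p
            have hx : ¬ (pyRank c cand name < 4 ∧ pyRank c cand name ≤ r') := by omega
            simp [hx]

theorem bestSpec_exact (c cand : String) (l : List (String × String))
    (h : l.any (fun kv => kv.1 == c) = true) : bestSpec c cand l = some (0, c) := by
  induction l with
  | nil => simp at h
  | cons kv rest ih =>
      obtain ⟨name, v⟩ := kv
      simp only [bestSpec]
      by_cases he : name == c
      · have hn : name = c := by exact eq_of_beq he
        have hr : pyRank c cand name = 0 := by simp [pyRank, he]
        rw [hr]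
        cases hb : bestSpec c cand rest with
        | none => simp [hn]
        | some p => obtain ⟨r', n'⟩ := p; simp [hn]
      · have hrest : rest.any (fun kv => kv.1 == c) = true := by
          simp only [List.any_cons] at h
          simp only [he, Bool.false_or] at h; exact h
        rw [ih hrest]
        have hr1 : 1 ≤ pyRank c cand name := by
          simp only [pyRank, he]
          split_ifs <;> first | omega | simp_all
        have hx : ¬ (pyRank c cand name < 4 ∧ pyRank c cand name ≤ 0) := by omega
        show (if pyRank c cand name < 4 ∧ pyRank c cand name ≤ 0 then
            some (pyRank c cand name, name) else some (0, c)) = some (0, c)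
        rw [if_neg hx]

theorem bestSpec_fst_ge1 (c cand : String) (l : List (String × String))
    (h : l.any (fun kv => kv.1 == c) = false) :
    ∀ r n, bestSpec c cand l = some (r, n) → 1 ≤ r := by
  induction l with
  | nil => intro r n hr; simp [bestSpec] at hr
  | cons kv rest ih =>
      intro r n hr
      obtain ⟨name, v⟩ := kv
      simp only [List.any_cons, Bool.or_eq_false_iff] at h
      have hname : (name == c) = false := h.1
      have h1 : 1 ≤ pyRank c cand name := by
        simp only [pyRank, hname]
        split_ifs <;> first | omega | simp_all
      simp only [bestSpec] at hr
      cases hb : bestSpec c cand rest with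
      | none =>
          rw [hb] at hr
          split_ifs at hr with hA
          · simp only [Option.some.injEq, Prod.mk.injEq] at hr
            omega
      | some p =>
          obtain ⟨r', n'⟩ := p
          have hr' := ih h.2 r' n' hb
          rw [hb] at hr
          have hr2 : (if pyRank c cand name < 4 ∧ pyRank c cand name ≤ r' then
              some (pyRank c cand name, name) else some (r', n')) = some (r, n) := hr
          split_ifs at hr2 with hA <;>
            simp only [Option.some.injEq, Prod.mk.injEq] at hr2 <;> omega

theorem bestSpec_cand (c cand : String) (l : List (String × String))
    (hne : l.any (fun kv => kv.1 == c) = false)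
    (h : l.any (fun kv => kv.1 == cand) = true) : bestSpec c cand l = some (1, cand) := by
  induction l with
  | nil => simp at h
  | cons kv rest ih =>
      obtain ⟨name, v⟩ := kv
      simp only [List.any_cons, Bool.or_eq_false_iff] at hne
      have hname : (name == c) = false := hne.1
      simp only [bestSpec]
      by_cases he : name == cand
      · have hn : name = cand := by exact eq_of_beq he
        have hr : pyRank c cand name = 1 := by simp [pyRank, hname, he]
        rw [hr]
        cases hb : bestSpec c cand rest with
        | none => simp [hn]
        | some p =>
            obtain ⟨r', n'⟩ := p
            have := bestSpec_fst_ge1 c cand rest hne.2 r' n' hb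
            have hx : (1:ℕ) < 4 ∧ 1 ≤ r' := by omega
            simp [hn, hx]
      · have hrest : rest.any (fun kv => kv.1 == cand) = true := by
          simp only [List.any_cons] at h
          simp only [he, Bool.false_or] at h; exact h
        rw [ih hne.2 hrest]
        have hr2 : 2 ≤ pyRank c cand name := by
          simp only [pyRank, hname, he]
          split_ifs <;> first | omega | simp_all
        have hx : ¬ (pyRank c cand name < 4 ∧ pyRank c cand name ≤ 1) := by omega
        show (if pyRank c cand name < 4 ∧ pyRank c cand name ≤ 1 then
            some (pyRank c cand name, name) else some (1, cand)) = some (1, cand)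
        rw [if_neg hx]

theorem bestSpec_fst_ge2 (c cand : String) (l : List (String × String))
    (hne : l.any (fun kv => kv.1 == c) = false)
    (hnc : l.any (fun kv => kv.1 == cand) = false) :
    ∀ r n, bestSpec c cand l = some (r, n) → 2 ≤ r := by
  induction l with
  | nil => intro r n hr; simp [bestSpec] at hr
  | cons kv rest ih =>
      intro r n hr
      obtain ⟨name, v⟩ := kv
      simp only [List.any_cons, Bool.or_eq_false_iff] at hne hnc
      have h2 : 2 ≤ pyRank c cand name := by
        simp only [pyRank, hne.1, hnc.1]
        split_ifs <;> first | omega | simp_all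
      simp only [bestSpec] at hr
      cases hb : bestSpec c cand rest with
      | none =>
          rw [hb] at hr
          split_ifs at hr with hA
          · simp only [Option.some.injEq, Prod.mk.injEq] at hr
            omega
      | some p =>
          obtain ⟨r', n'⟩ := p
          have hr' := ih hne.2 hnc.2 r' n' hb
          rw [hb] at hr
          have hr2 : (if pyRank c cand name < 4 ∧ pyRank c cand name ≤ r' then
              some (pyRank c cand name, name) else some (r', n')) = some (r, n) := hr
          split_ifs at hr2 with hA <;>
            simp only [Option.some.injEq, Prod.mk.injEq] at hr2 <;> omega

theorem bestSpec_scans (c cand : String) (l : List (String × String))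
    (hne : l.any (fun kv => kv.1 == c) = false)
    (hnc : l.any (fun kv => kv.1 == cand) = false) :
    bestSpec c cand l =
      match pyGoStarts c l with
      | some n => some (2, n)
      | none =>
          match pyGoContains c l with
          | some n => some (3, n)
          | none => none := by
  induction l with
  | nil => simp [bestSpec, pyGoStarts, pyGoContains]
  | cons kv rest ih =>
      obtain ⟨name, v⟩ := kv
      simp only [List.any_cons, Bool.or_eq_false_iff] at hne hnc
      have ih' := ih hne.2 hnc.2
      simp only [bestSpec, pyGoStarts, pyGoContains]
      by_cases hs : PySem.Str.startswith name c = true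
      · have hs2 : PySem.Chars.startswith name.toList c.toList = true := by simpa using hs
        have hr : pyRank c cand name = 2 := by simp [pyRank, hne.1, hnc.1, hs2]
        rw [hr, if_pos hs]
        cases hb : bestSpec c cand rest with
        | none => simp
        | some p =>
            obtain ⟨r', n'⟩ := p
            have := bestSpec_fst_ge2 c cand rest hne.2 hnc.2 r' n' hb
            have hx : (2:ℕ) < 4 ∧ 2 ≤ r' := by omega
            simp [hx]
      · have hs2 : PySem.Chars.startswith name.toList c.toList = false := by simpa using hs
        rw [if_neg hs]
        by_cases hc : PySem.Str.isIn c name = true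
        · have hc2 : PySem.Chars.isIn c.toList name.toList = true := by simpa using hc
          have hr : pyRank c cand name = 3 := by simp [pyRank, hne.1, hnc.1, hs2, hc2]
          rw [hr, if_pos hc, ih']
          cases hgs : pyGoStarts c rest with
          | some n => simp
          | none =>
              cases hgc : pyGoContains c rest with
              | some n => simp
              | none => simp
        · have hc2 : PySem.Chars.isIn c.toList name.toList = false := by simpa using hc
          have hr : pyRank c cand name = 4 := by simp [pyRank, hne.1, hnc.1, hs2, hc2]
          rw [hr, if_neg hc, ih']
          cases hgs : pyGoStarts c rest with
          | some n => simp
          | none =>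
              cases hgc : pyGoContains c rest with
              | some n => simp
              | none => simp

-- ===== VERDICT (by name: the statement is the Claim_ definition above) =====
theorem resolve_bus_name_py_spec : Claim_equal_resolve_bus_name_py := by
  intro config_bus bus_dict _
  unfold Spec_resolve_bus_name_py
  simp only [resolve_bus_name_py, resolve_bus_name_py_alt]
  rw [pyBestLoop_none]
  by_cases h1 : (bus_dict.any fun kv => kv.1 == config_bus) = true
  · rw [bestSpec_exact config_bus (config_bus ++ "_0.415") bus_dict h1]
    simp [h1]
  · have h1' : (bus_dict.any fun kv => kv.1 == config_bus) = false := by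
      rw [Bool.not_eq_true] at h1; exact h1
    by_cases h2 : (bus_dict.any fun kv => kv.1 == config_bus ++ "_0.415") = true
    · rw [bestSpec_cand config_bus (config_bus ++ "_0.415") bus_dict h1' h2]
      simp [h1', h2]
    · have h2' : (bus_dict.any fun kv => kv.1 == config_bus ++ "_0.415") = false := by
        rw [Bool.not_eq_true] at h2; exact h2
      rw [bestSpec_scans config_bus (config_bus ++ "_0.415") bus_dict h1' h2']
      simp only [h1', h2', Bool.false_eq_true, if_false]
      cases hgs : pyGoStarts config_bus bus_dict with
      | some n => simp
      | none =>
          cases hgc : pyGoContains config_bus bus_dict with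
          | some n => simp
          | none => simp
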